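-- pv_equiv track=rewrite | github.com/bit-short/arogyadost-backend | app/services/recommendations/recommendation_builder.py | _get_most_urgent_timing
-- ===== SOURCE A (Python) =====
-- from typing import List
--
-- def _get_most_urgent_timing(timings: List[str]) -> str:
--     """Get the most urgent timing from a list."""
--     # Simple urgency scoring based on keywords
--     urgency_scores = {}
--
--     for timing in timings:
--         timing_lower = timing.lower()
--         if "1 week" in timing_lower or "immediately" in timing_lower:
--             urgency_scores[timing] = 7
--         elif "2 weeks" in timing_lower:
--             urgency_scores[timing] = 6
--         elif "1 month" in timing_lower:
--             urgency_scores[timing] = 5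
--         elif "6 weeks" in timing_lower:
--             urgency_scores[timing] = 4
--         elif "2 months" in timing_lower:
--             urgency_scores[timing] = 3
--         elif "3 months" in timing_lower:
--             urgency_scores[timing] = 2
--         else:
--             urgency_scores[timing] = 1
--
--     # Return timing with highest urgency score
--     if urgency_scores:
--         return max(urgency_scores.items(), key=lambda x: x[1])[0]
--
--     return "within 4 weeks"
-- ===== SOURCE B (Python) =====
-- from typing import List
--
-- # Keyword tiers in descending urgency order (same keywords as the elif chain).
-- _TIERS = [
--     (("1 week", "immediately"), 7),
--     (("2 weeks",), 6),
--     (("1 month",), 5),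
--     (("6 weeks",), 4),
--     (("2 months",), 3),
--     (("3 months",), 2),
-- ]
--
--
-- def _get_most_urgent_timing(timings: List[str]) -> str:
--     """Get the most urgent timing from a list."""
--     if not timings:
--         return "within 4 weeks"
--     for keywords, _score in _TIERS:
--         for timing in timings:
--             low = timing.lower()
--             if any(kw in low for kw in keywords):
--                 return timing
--     return timings[0]
-- ===== Notes on version B (the rewrite author's own statement) =====
-- stated objective: alternative
-- what changed: Replaced the score-dict-then-max pipeline by a tier-first search: keyword tiers are listed in descending urgency and B returns the first timing matching the highest tier that matches anything, falling back to the first timing; no dict and no max are built.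
import Mathlib
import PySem

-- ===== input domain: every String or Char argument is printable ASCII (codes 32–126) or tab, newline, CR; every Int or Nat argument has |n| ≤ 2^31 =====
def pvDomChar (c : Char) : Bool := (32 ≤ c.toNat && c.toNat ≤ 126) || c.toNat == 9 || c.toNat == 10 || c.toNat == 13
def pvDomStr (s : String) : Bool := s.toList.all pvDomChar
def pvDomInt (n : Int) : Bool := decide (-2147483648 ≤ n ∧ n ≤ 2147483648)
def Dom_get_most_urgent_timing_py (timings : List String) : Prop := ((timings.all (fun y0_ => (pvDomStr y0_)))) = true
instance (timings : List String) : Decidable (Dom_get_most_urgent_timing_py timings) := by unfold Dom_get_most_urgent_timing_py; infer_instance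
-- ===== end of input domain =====

-- B replaces A's score-dict-plus-max pipeline by a tier-first search (highest tier scanned first,
-- earliest matching timing returned, head as fallback); alternative decomposition, same results.

-- ===== PORT A =====
def get_most_urgent_timing_py (timings : List String) : String :=
  let urgency_scores : PySem.Dict String Int :=
    timings.foldl (fun d timing =>
      let timing_lower := PySem.Str.lower timing
      if PySem.Str.isIn "1 week" timing_lower || PySem.Str.isIn "immediately" timing_lower then
        d.insert timing 7
      else if PySem.Str.isIn "2 weeks" timing_lower then d.insert timing 6
      else if PySem.Str.isIn "1 month" timing_lower then d.insert timing 5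
      else if PySem.Str.isIn "6 weeks" timing_lower then d.insert timing 4
      else if PySem.Str.isIn "2 months" timing_lower then d.insert timing 3
      else if PySem.Str.isIn "3 months" timing_lower then d.insert timing 2
      else d.insert timing 1) PySem.Dict.empty
  match PySem.List.max? urgency_scores.items (fun x => x.2) with
  | some p => p.1
  | none => "within 4 weeks"

-- ===== PORT B =====
-- the module constant _TIERS of Source B
def pvTiers : List (List String × Int) :=
  [(["1 week", "immediately"], 7), (["2 weeks"], 6), (["1 month"], 5),
   (["6 weeks"], 4), (["2 months"], 3), (["3 months"], 2)]

def get_most_urgent_timing_py_alt (timings : List String) : String :=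
  match timings with
  | [] => "within 4 weeks"
  | t0 :: rest =>
    match pvTiers.findSome? (fun tier =>
        (t0 :: rest).find? (fun timing =>
          tier.1.any (fun kw => PySem.Str.isIn kw (PySem.Str.lower timing)))) with
    | some t => t
    | none => t0

-- ===== PRECONDITION & SPEC =====
def Spec_get_most_urgent_timing_py (timings : List String) (out : String) : Prop := out = get_most_urgent_timing_py_alt timings
instance (timings : List String) (out : String) : Decidable (Spec_get_most_urgent_timing_py timings out) := by unfold Spec_get_most_urgent_timing_py; infer_instance

-- ===== CLAIM (what is proved, stated in full; the proofs are below) =====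
def Claim_equal_get_most_urgent_timing_py : Prop := ∀ (timings : List String), Dom_get_most_urgent_timing_py timings → Spec_get_most_urgent_timing_py timings (get_most_urgent_timing_py timings)

-- ===== LEMMAS AND PROOFS =====

-- the six keyword tests, in A's elif order (= B's tier order)
def pv7 (t : String) : Bool := PySem.Str.isIn "1 week" (PySem.Str.lower t) || PySem.Str.isIn "immediately" (PySem.Str.lower t)
def pv6 (t : String) : Bool := PySem.Str.isIn "2 weeks" (PySem.Str.lower t)
def pv5 (t : String) : Bool := PySem.Str.isIn "1 month" (PySem.Str.lower t)
def pv4 (t : String) : Bool := PySem.Str.isIn "6 weeks" (PySem.Str.lower t)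
def pv3 (t : String) : Bool := PySem.Str.isIn "2 months" (PySem.Str.lower t)
def pv2 (t : String) : Bool := PySem.Str.isIn "3 months" (PySem.Str.lower t)

-- the urgency score A assigns to a single string
def pvScore (t : String) : Int :=
  if pv7 t then 7 else if pv6 t then 6 else if pv5 t then 5
  else if pv4 t then 4 else if pv3 t then 3 else if pv2 t then 2 else 1

def pvStep (d : PySem.Dict String Int) (t : String) : PySem.Dict String Int := d.insert t (pvScore t)

-- Python's running max over strings keyed by pvScore (first maximum wins)
def pvRun (acc : Option String) (l : List String) : Option String :=
  l.foldl (fun acc t => match acc with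
    | none => some t
    | some m => if pvScore m < pvScore t then some t else some m) acc

-- the same running max over (string, score) pairs keyed by the second component
def pvRunP (acc : Option (String × Int)) (l : List String) : Option (String × Int) :=
  l.foldl (fun acc t => match acc with
    | none => some (t, pvScore t)
    | some m => if m.2 < pvScore t then some (t, pvScore t) else some m) acc

def pvG (t : String) : String × Int := (t, pvScore t)

lemma pvRun_none_eq (l : List String) : pvRun none l = PySem.List.max? l pvScore := by
  unfold pvRun PySem.List.max?
  congr 1
  funext acc t
  cases acc <;> rfl

-- the same running max over arbitrary pairs, keyed by the second component
def pvRunQ (acc : Option (String × Int)) (xs : List (String × Int)) : Option (String × Int) :=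
  xs.foldl (fun acc x => match acc with
    | none => some x
    | some m => if m.2 < x.2 then some x else some m) acc

lemma pvRunQ_none_eq (xs : List (String × Int)) :
    pvRunQ none xs = PySem.List.max? xs (fun x => x.2) := by
  unfold pvRunQ PySem.List.max?
  congr 1
  funext acc x
  cases acc <;> rfl

lemma pvMax_append_singleton (xs : List (String × Int)) (p : String × Int) :
    PySem.List.max? (xs ++ [p]) (fun x => x.2)
      = match PySem.List.max? xs (fun x => x.2) with
        | none => some p
        | some m => if m.2 < p.2 then some p else some m := by
  rw [← pvRunQ_none_eq, ← pvRunQ_none_eq]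
  unfold pvRunQ
  rw [List.foldl_append]
  cases List.foldl _ none xs <;> rfl

lemma pvRun_append (acc : Option String) (l1 l2 : List String) :
    pvRun acc (l1 ++ l2) = pvRun (pvRun acc l1) l2 := by
  unfold pvRun; rw [List.foldl_append]

lemma pvRun_stay (l : List String) (a : String) (h : ∀ y ∈ l, pvScore y ≤ pvScore a) :
    pvRun (some a) l = some a := by
  induction l with
  | nil => rfl
  | cons y l ih =>
    have : pvRun (some a) (y :: l) = pvRun (if pvScore a < pvScore y then some y else some a) l := rfl
    rw [this, if_neg (not_lt.mpr (h y (List.mem_cons_self)))]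
    exact ih (fun z hz => h z (List.mem_cons_of_mem _ hz))

lemma pvRun_first (l1 l2 : List String) (t : String)
    (h1 : ∀ y ∈ l1, pvScore y < pvScore t) (h2 : ∀ y ∈ l2, pvScore y ≤ pvScore t) :
    pvRun none (l1 ++ t :: l2) = some t := by
  rw [pvRun_append]
  cases hm : pvRun none l1 with
  | none =>
    have : pvRun none (t :: l2) = pvRun (some t) l2 := rfl
    rw [this]; exact pvRun_stay _ _ h2
  | some m =>
    have hmem : m ∈ l1 := PySem.List.max?_mem (by rw [← pvRun_none_eq]; exact hm)
    have : pvRun (some m) (t :: l2) = pvRun (if pvScore m < pvScore t then some t else some m) l2 := rfl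
    rw [this, if_pos (h1 m hmem)]; exact pvRun_stay _ _ h2

-- A's fold body is pvStep
lemma pvBody_eq (d : PySem.Dict String Int) (t : String) :
    (let timing_lower := PySem.Str.lower t
     if PySem.Str.isIn "1 week" timing_lower || PySem.Str.isIn "immediately" timing_lower then
       d.insert t 7
     else if PySem.Str.isIn "2 weeks" timing_lower then d.insert t 6
     else if PySem.Str.isIn "1 month" timing_lower then d.insert t 5
     else if PySem.Str.isIn "6 weeks" timing_lower then d.insert t 4
     else if PySem.Str.isIn "2 months" timing_lower then d.insert t 3
     else if PySem.Str.isIn "3 months" timing_lower then d.insert t 2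
     else d.insert t 1) = pvStep d t := by
  simp only [pvStep, pvScore, pv7, pv6, pv5, pv4, pv3, pv2]
  split_ifs <;> rfl

lemma pvFoldA_eq (l : List String) (d : PySem.Dict String Int) :
    l.foldl (fun d timing =>
      let timing_lower := PySem.Str.lower timing
      if PySem.Str.isIn "1 week" timing_lower || PySem.Str.isIn "immediately" timing_lower then
        d.insert timing 7
      else if PySem.Str.isIn "2 weeks" timing_lower then d.insert timing 6
      else if PySem.Str.isIn "1 month" timing_lower then d.insert timing 5
      else if PySem.Str.isIn "6 weeks" timing_lower then d.insert timing 4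
      else if PySem.Str.isIn "2 months" timing_lower then d.insert timing 3
      else if PySem.Str.isIn "3 months" timing_lower then d.insert timing 2
      else d.insert timing 1) d = l.foldl pvStep d := by
  induction l generalizing d with
  | nil => rfl
  | cons t l ih => rw [List.foldl_cons, List.foldl_cons, pvBody_eq, ih]

-- running max of the dict items after one insert
set_option maxHeartbeats 1000000 in
lemma pvMax_insert (d : PySem.Dict String Int) (t : String)
    (hprop : ∀ p ∈ d.items, p.2 = pvScore p.1) :
    PySem.List.max? (d.insert t (pvScore t)).items (fun x => x.2)
      = match PySem.List.max? d.items (fun x => x.2) with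
        | none => some (t, pvScore t)
        | some m => if m.2 < pvScore t then some (t, pvScore t) else some m := by
  by_cases hc : d.contains t = true
  · have hid : d.insert t (pvScore t) = d := by
      apply PySem.Dict.ext
      rw [PySem.Dict.items_insert_of_contains d _ hc]
      conv_rhs => rw [← List.map_id d.items]
      apply List.map_congr_left
      intro p hp
      by_cases hb : (p.1 == t) = true
      · have h1 : p.1 = t := by simpa using hb
        have h2 : p = (t, pvScore t) := Prod.ext h1 (by rw [hprop p hp, h1])
        rw [if_pos hb, h2]
        rfl
      · rw [if_neg hb]
        rfl
    rw [hid]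
    have hkey : t ∈ d.keys := (PySem.Dict.contains_iff_mem_keys d t).mp hc
    have hkeys : d.keys = d.items.map Prod.fst := rfl
    rw [hkeys] at hkey
    obtain ⟨p, hp, hpt⟩ := List.mem_map.mp hkey
    cases hm : PySem.List.max? d.items (fun x => x.2) with
    | none =>
      have hnil := (PySem.List.max?_eq_none_iff d.items _).mp hm
      rw [hnil] at hp
      cases hp
    | some m =>
      have hpair : (t, pvScore t) ∈ d.items := by
        have hpe : p = (t, pvScore t) := Prod.ext hpt (by rw [hprop p hp, hpt])
        rwa [hpe] at hp
      have hle0 := PySem.List.max?_isMax hm (t, pvScore t) hpair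
      have hle : pvScore t ≤ m.2 := by simpa using hle0
      show some m = if m.2 < pvScore t then some (t, pvScore t) else some m
      rw [if_neg (not_lt.mpr hle)]
  · have hcf : d.contains t = false := by simpa using hc
    rw [PySem.Dict.items_insert_of_not_contains d _ hcf, pvMax_append_singleton]

lemma pvStep_prop (d : PySem.Dict String Int) (t : String)
    (hprop : ∀ p ∈ d.items, p.2 = pvScore p.1) :
    ∀ p ∈ (pvStep d t).items, p.2 = pvScore p.1 := by
  intro p hp
  rcases (PySem.Dict.mem_items_insert _ _ _ _).mp hp with h | ⟨h, _⟩
  · rw [h]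
  · exact hprop p h

lemma pvMax_fold (l : List String) :
    ∀ (d : PySem.Dict String Int), (∀ p ∈ d.items, p.2 = pvScore p.1) →
    PySem.List.max? (l.foldl pvStep d).items (fun x => x.2)
      = pvRunP (PySem.List.max? d.items (fun x => x.2)) l := by
  induction l with
  | nil => intro d _; rfl
  | cons t l ih =>
    intro d hprop
    rw [List.foldl_cons, ih (pvStep d t) (pvStep_prop d t hprop)]
    rw [show pvStep d t = d.insert t (pvScore t) from rfl, pvMax_insert d t hprop]
    cases PySem.List.max? d.items (fun x => x.2) <;> rfl

lemma pvRunP_map (l : List String) :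
    ∀ (a : Option String), pvRunP (a.map pvG) l = (pvRun a l).map pvG := by
  induction l with
  | nil => intro a; rfl
  | cons t l ih =>
    intro a
    cases a with
    | none =>
      show pvRunP (some (pvG t)) l = (pvRun (some t) l).map pvG
      exact ih (some t)
    | some m =>
      show pvRunP (if (pvG m).2 < pvScore t then some (t, pvScore t) else some (pvG m)) l
        = (pvRun (if pvScore m < pvScore t then some t else some m) l).map pvG
      by_cases hc : pvScore m < pvScore t
      · rw [if_pos (show (pvG m).2 < pvScore t from hc), if_pos hc]; exact ih (some t)
      · rw [if_neg (show ¬ (pvG m).2 < pvScore t from hc), if_neg hc]; exact ih (some m)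

-- A computes the first maximum of pvScore
lemma pvA_char (l : List String) :
    get_most_urgent_timing_py l
      = match pvRun none l with | some m => m | none => "within 4 weeks" := by
  simp only [get_most_urgent_timing_py]
  rw [pvFoldA_eq]
  rw [pvMax_fold l PySem.Dict.empty (by intro p hp; simp [PySem.Dict.empty] at hp)]
  have h : pvRunP (PySem.List.max? (PySem.Dict.empty : PySem.Dict String Int).items (fun x => x.2)) l
      = (pvRun none l).map pvG := pvRunP_map l none
  rw [h]
  cases pvRun none l <;> rfl

lemma pvFind_split {p : String → Bool} :
    ∀ {l : List String} {t : String}, l.find? p = some t →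
      p t = true ∧ ∃ l1 l2, l = l1 ++ t :: l2 ∧ ∀ y ∈ l1, p y = false := by
  intro l
  induction l with
  | nil => intro t h; simp at h
  | cons a l ih =>
    intro t h
    by_cases ha : p a
    · rw [List.find?_cons_of_pos ha] at h
      obtain rfl : a = t := by injection h
      exact ⟨ha, [], l, rfl, by intro y hy; cases hy⟩
    · rw [List.find?_cons_of_neg (by simpa using ha)] at h
      obtain ⟨hp, l1, l2, hl, h1⟩ := ih h
      refine ⟨hp, a :: l1, l2, by rw [hl]; rfl, ?_⟩
      intro y hy
      rcases List.mem_cons.mp hy with rfl | hy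
      · simpa using ha
      · exact h1 y hy

-- score computations
lemma pvScore_le7 (t : String) : pvScore t ≤ 7 := by unfold pvScore; split_ifs <;> omega
lemma pvScore_eq7 {t : String} (h : pv7 t = true) : pvScore t = 7 := by simp [pvScore, h]
lemma pvScore_le6 {t : String} (h7 : pv7 t = false) : pvScore t ≤ 6 := by
  unfold pvScore; rw [h7]; simp only [Bool.false_eq_true, if_false]; split_ifs <;> omega
lemma pvScore_eq6 {t : String} (h7 : pv7 t = false) (h : pv6 t = true) : pvScore t = 6 := by
  simp [pvScore, h7, h]
lemma pvScore_le5 {t : String} (h7 : pv7 t = false) (h6 : pv6 t = false) : pvScore t ≤ 5 := by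
  unfold pvScore; rw [h7, h6]; simp only [Bool.false_eq_true, if_false]; split_ifs <;> omega
lemma pvScore_eq5 {t : String} (h7 : pv7 t = false) (h6 : pv6 t = false) (h : pv5 t = true) :
    pvScore t = 5 := by simp [pvScore, h7, h6, h]
lemma pvScore_le4 {t : String} (h7 : pv7 t = false) (h6 : pv6 t = false) (h5 : pv5 t = false) :
    pvScore t ≤ 4 := by
  unfold pvScore; rw [h7, h6, h5]; simp only [Bool.false_eq_true, if_false]; split_ifs <;> omega
lemma pvScore_eq4 {t : String} (h7 : pv7 t = false) (h6 : pv6 t = false) (h5 : pv5 t = false)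
    (h : pv4 t = true) : pvScore t = 4 := by simp [pvScore, h7, h6, h5, h]
lemma pvScore_le3 {t : String} (h7 : pv7 t = false) (h6 : pv6 t = false) (h5 : pv5 t = false)
    (h4 : pv4 t = false) : pvScore t ≤ 3 := by
  unfold pvScore; rw [h7, h6, h5, h4]; simp only [Bool.false_eq_true, if_false]; split_ifs <;> omega
lemma pvScore_eq3 {t : String} (h7 : pv7 t = false) (h6 : pv6 t = false) (h5 : pv5 t = false)
    (h4 : pv4 t = false) (h : pv3 t = true) : pvScore t = 3 := by simp [pvScore, h7, h6, h5, h4, h]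
lemma pvScore_le2 {t : String} (h7 : pv7 t = false) (h6 : pv6 t = false) (h5 : pv5 t = false)
    (h4 : pv4 t = false) (h3 : pv3 t = false) : pvScore t ≤ 2 := by
  unfold pvScore; rw [h7, h6, h5, h4, h3]; simp only [Bool.false_eq_true, if_false]
  split_ifs <;> omega
lemma pvScore_eq2 {t : String} (h7 : pv7 t = false) (h6 : pv6 t = false) (h5 : pv5 t = false)
    (h4 : pv4 t = false) (h3 : pv3 t = false) (h : pv2 t = true) : pvScore t = 2 := by
  simp [pvScore, h7, h6, h5, h4, h3, h]
lemma pvScore_eq1 {t : String} (h7 : pv7 t = false) (h6 : pv6 t = false) (h5 : pv5 t = false)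
    (h4 : pv4 t = false) (h3 : pv3 t = false) (h2 : pv2 t = false) : pvScore t = 1 := by
  simp [pvScore, h7, h6, h5, h4, h3, h2]

-- the running max lands on the earliest hit of the highest matching tier
lemma pvRun_of_find {p : String → Bool} {l : List String} {t : String}
    (hfind : l.find? p = some t)
    (hub : ∀ y ∈ l, pvScore y ≤ pvScore t)
    (hlow : ∀ y ∈ l, p y = false → pvScore y < pvScore t) :
    pvRun none l = some t := by
  obtain ⟨_, l1, l2, hl, h1⟩ := pvFind_split hfind
  subst hl
  exact pvRun_first l1 l2 t
    (fun y hy => hlow y (List.mem_append_left _ hy) (h1 y hy))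
    (fun y hy => hub y (List.mem_append_right _ (List.mem_cons_of_mem _ hy)))

-- ===== VERDICT (by name: the statement is the Claim_ definition above) =====
theorem get_most_urgent_timing_py_spec : Claim_equal_get_most_urgent_timing_py := by
  intro l _
  unfold Spec_get_most_urgent_timing_py
  cases l with
  | nil => rfl
  | cons t0 rest =>
    rw [pvA_char]
    simp only [get_most_urgent_timing_py_alt, pvTiers, List.findSome?_cons, List.findSome?_nil,
      List.any_cons, List.any_nil, Bool.or_false]
    cases h7 : List.find? (fun timing => PySem.Str.isIn "1 week" (PySem.Str.lower timing) || PySem.Str.isIn "immediately" (PySem.Str.lower timing)) (t0 :: rest) with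
    | some t =>
      have hp : pv7 t = true := (pvFind_split h7).1
      have hr : pvRun none (t0 :: rest) = some t := by
        apply pvRun_of_find h7
        · intro y _
          rw [pvScore_eq7 hp]
          exact pvScore_le7 y
        · intro y _ hy7
          rw [pvScore_eq7 hp]
          have := pvScore_le6 (t := y) hy7
          omega
      rw [hr]
    | none =>
      have h7a : ∀ y ∈ (t0 :: rest), pv7 y = false := by
        intro y hy
        exact Bool.eq_false_iff.mpr (List.find?_eq_none.mp h7 y hy)
      cases h6 : List.find? (fun timing => PySem.Str.isIn "2 weeks" (PySem.Str.lower timing)) (t0 :: rest) with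
      | some t =>
        have ht : t ∈ (t0 :: rest) := List.mem_of_find?_eq_some h6
        have hst : pvScore t = 6 := pvScore_eq6 (h7a t ht) (pvFind_split h6).1
        have hr : pvRun none (t0 :: rest) = some t := by
          apply pvRun_of_find h6
          · intro y hy
            rw [hst]
            exact pvScore_le6 (h7a y hy)
          · intro y hy hy6
            rw [hst]
            have := pvScore_le5 (h7a y hy) (t := y) hy6
            omega
        rw [hr]
      | none =>
        have h6a : ∀ y ∈ (t0 :: rest), pv6 y = false := by
          intro y hy
          exact Bool.eq_false_iff.mpr (List.find?_eq_none.mp h6 y hy)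
        cases h5 : List.find? (fun timing => PySem.Str.isIn "1 month" (PySem.Str.lower timing)) (t0 :: rest) with
        | some t =>
          have ht : t ∈ (t0 :: rest) := List.mem_of_find?_eq_some h5
          have hst : pvScore t = 5 := pvScore_eq5 (h7a t ht) (h6a t ht) (pvFind_split h5).1
          have hr : pvRun none (t0 :: rest) = some t := by
            apply pvRun_of_find h5
            · intro y hy
              rw [hst]
              exact pvScore_le5 (h7a y hy) (h6a y hy)
            · intro y hy hy5
              rw [hst]
              have := pvScore_le4 (h7a y hy) (h6a y hy) (t := y) hy5
              omega
          rw [hr]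
        | none =>
          have h5a : ∀ y ∈ (t0 :: rest), pv5 y = false := by
            intro y hy
            exact Bool.eq_false_iff.mpr (List.find?_eq_none.mp h5 y hy)
          cases h4 : List.find? (fun timing => PySem.Str.isIn "6 weeks" (PySem.Str.lower timing)) (t0 :: rest) with
          | some t =>
            have ht : t ∈ (t0 :: rest) := List.mem_of_find?_eq_some h4
            have hst : pvScore t = 4 :=
              pvScore_eq4 (h7a t ht) (h6a t ht) (h5a t ht) (pvFind_split h4).1
            have hr : pvRun none (t0 :: rest) = some t := by
              apply pvRun_of_find h4
              · intro y hy
                rw [hst]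
                exact pvScore_le4 (h7a y hy) (h6a y hy) (h5a y hy)
              · intro y hy hy4
                rw [hst]
                have := pvScore_le3 (h7a y hy) (h6a y hy) (h5a y hy) (t := y) hy4
                omega
            rw [hr]
          | none =>
            have h4a : ∀ y ∈ (t0 :: rest), pv4 y = false := by
              intro y hy
              exact Bool.eq_false_iff.mpr (List.find?_eq_none.mp h4 y hy)
            cases h3 : List.find? (fun timing => PySem.Str.isIn "2 months" (PySem.Str.lower timing)) (t0 :: rest) with
            | some t =>
              have ht : t ∈ (t0 :: rest) := List.mem_of_find?_eq_some h3
              have hst : pvScore t = 3 :=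
                pvScore_eq3 (h7a t ht) (h6a t ht) (h5a t ht) (h4a t ht) (pvFind_split h3).1
              have hr : pvRun none (t0 :: rest) = some t := by
                apply pvRun_of_find h3
                · intro y hy
                  rw [hst]
                  exact pvScore_le3 (h7a y hy) (h6a y hy) (h5a y hy) (h4a y hy)
                · intro y hy hy3
                  rw [hst]
                  have := pvScore_le2 (h7a y hy) (h6a y hy) (h5a y hy) (h4a y hy) (t := y) hy3
                  omega
              rw [hr]
            | none =>
              have h3a : ∀ y ∈ (t0 :: rest), pv3 y = false := by
                intro y hy
                exact Bool.eq_false_iff.mpr (List.find?_eq_none.mp h3 y hy)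
              cases h2 : List.find? (fun timing => PySem.Str.isIn "3 months" (PySem.Str.lower timing)) (t0 :: rest) with
              | some t =>
                have ht : t ∈ (t0 :: rest) := List.mem_of_find?_eq_some h2
                have hst : pvScore t = 2 :=
                  pvScore_eq2 (h7a t ht) (h6a t ht) (h5a t ht) (h4a t ht) (h3a t ht)
                    (pvFind_split h2).1
                have hr : pvRun none (t0 :: rest) = some t := by
                  apply pvRun_of_find h2
                  · intro y hy
                    rw [hst]
                    exact pvScore_le2 (h7a y hy) (h6a y hy) (h5a y hy) (h4a y hy) (h3a y hy)
                  · intro y hy hy2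
                    rw [hst]
                    have h1 := pvScore_eq1 (h7a y hy) (h6a y hy) (h5a y hy) (h4a y hy)
                      (h3a y hy) (t := y) hy2
                    omega
                rw [hr]
              | none =>
                have h2a : ∀ y ∈ (t0 :: rest), pv2 y = false := by
                  intro y hy
                  exact Bool.eq_false_iff.mpr (List.find?_eq_none.mp h2 y hy)
                have hall : ∀ y ∈ (t0 :: rest), pvScore y = 1 := fun y hy =>
                  pvScore_eq1 (h7a y hy) (h6a y hy) (h5a y hy) (h4a y hy) (h3a y hy) (h2a y hy)
                have hr : pvRun none (t0 :: rest) = some t0 := by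
                  have h := pvRun_first [] rest t0 (by intro y hy; cases hy)
                    (by intro y hy
                        rw [hall y (List.mem_cons_of_mem _ hy), hall t0 List.mem_cons_self])
                  simpa using h
                rw [hr]
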